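-- pv_equiv track=rewrite | github.com/adinashby-vanier-college/programming-in-science-midterm-v1-PhilipBianco | Midterm.py | hollow_right_triangle
-- ===== SOURCE A (Python) =====
-- def hollow_right_triangle(n):
--     if n < 4:
--         return "The triangle height should be at least 4."
--
--     result = ""
--
--     for p in range(n):
--         for b in range(p + 1):
--             if p == 0 or p == n - 1:
--                 result += "*"
--             elif b == 0 or b == p:
--                 result += "*"
--             else:
--                 result += " "
--         if p < n - 1:
--             result += "\n"
--
--     return result
-- ===== SOURCE B (Python) =====
-- def hollow_right_triangle(n):
--     if n < 4:
--         return "The triangle height should be at least 4."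
--     lines = []
--     for p in range(n):
--         if p == 0 or p == n - 1:
--             lines.append("*" * (p + 1))
--         else:
--             lines.append("*" + " " * (p - 1) + "*")
--     return "\n".join(lines)
-- ===== Notes on version B (the rewrite author's own statement) =====
-- stated objective: simpler
-- what changed: Replaces the nested per-character loop with a single loop producing each row as a closed-form string ('*'*(p+1) or '*'+' '*(p-1)+'*') joined by newlines.
import Mathlib
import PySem

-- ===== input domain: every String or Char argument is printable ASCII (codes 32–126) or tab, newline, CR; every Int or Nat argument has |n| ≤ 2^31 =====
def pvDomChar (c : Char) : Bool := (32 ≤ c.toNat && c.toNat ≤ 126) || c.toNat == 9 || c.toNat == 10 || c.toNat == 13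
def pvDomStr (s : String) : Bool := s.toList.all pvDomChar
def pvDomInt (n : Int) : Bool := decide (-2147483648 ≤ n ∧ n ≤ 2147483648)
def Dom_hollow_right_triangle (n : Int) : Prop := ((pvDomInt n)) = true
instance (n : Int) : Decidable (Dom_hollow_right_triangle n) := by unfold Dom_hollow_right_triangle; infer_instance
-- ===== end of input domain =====

-- B replaces A's nested per-character loop by one loop producing each row as a closed-form string joined with '\n' (objective: simpler).

-- ===== PORT A =====
def hollow_right_triangle (n : Int) : String :=
  if n < 4 then "The triangle height should be at least 4."
  else
    String.ofList ((PySem.List.pyRange 0 n 1).foldl (fun result p =>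
      let result := (PySem.List.pyRange 0 (p + 1) 1).foldl (fun result b =>
        if p = 0 ∨ p = n - 1 then result ++ ['*']
        else if b = 0 ∨ b = p then result ++ ['*']
        else result ++ [' ']) result
      if p < n - 1 then result ++ ['\n'] else result) [])

-- ===== PORT B =====
-- one row of the triangle, as a closed form ('*'*(p+1)  or  '*' + ' '*(p-1) + '*')
def pvRow (n p : Int) : List Char :=
  if p = 0 ∨ p = n - 1 then List.replicate (p + 1).toNat '*'
  else ['*'] ++ List.replicate (p - 1).toNat ' ' ++ ['*']

def hollow_right_triangle_alt (n : Int) : String :=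
  if n < 4 then "The triangle height should be at least 4."
  else String.ofList (PySem.Chars.join ['\n'] ((PySem.List.pyRange 0 n 1).map (pvRow n)))

-- ===== PRECONDITION & SPEC =====
def Spec_hollow_right_triangle (n : Int) (out : String) : Prop := out = hollow_right_triangle_alt n
instance (n : Int) (out : String) : Decidable (Spec_hollow_right_triangle n out) := by unfold Spec_hollow_right_triangle; infer_instance

-- ===== CLAIM (what is proved, stated in full; the proofs are below) =====
def Claim_equal_hollow_right_triangle : Prop := ∀ (n : Int), Dom_hollow_right_triangle n → Spec_hollow_right_triangle n (hollow_right_triangle n)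

-- ===== LEMMAS AND PROOFS =====

-- '\n'.join(rs ++ [r]) unrolls to the flatMap A's loop produces
theorem pv_join_snoc (sep r : List Char) (rs : List (List Char)) :
    PySem.Chars.join sep (rs ++ [r]) = rs.flatMap (· ++ sep) ++ r := by
  induction rs with
  | nil => simp [PySem.Chars.join_singleton]
  | cons a t ih =>
      cases t with
      | nil => simp [PySem.Chars.join_cons_cons, PySem.Chars.join_singleton]
      | cons b t' =>
          rw [List.cons_append, List.cons_append, PySem.Chars.join_cons_cons,
              ← List.cons_append, ih]
          simp [List.flatMap_cons]

-- the hollow middle of a row, head column only stars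
theorem pv_mid_range (m : Nat) :
    (List.range (m + 1)).map (fun b => if b = 0 then '*' else ' ')
      = '*' :: List.replicate m ' ' := by
  induction m with
  | zero => simp [List.range_succ]
  | succ m ih =>
      rw [List.range_succ, List.map_append, ih]
      simp [List.replicate_succ']

-- the inner per-character loop of A produces exactly B's closed-form row
theorem pv_inner (n p : Int) (hp : 0 ≤ p) (hpn : p < n) (acc : List Char) :
    (PySem.List.pyRange 0 (p + 1) 1).foldl (fun result b =>
        if p = 0 ∨ p = n - 1 then result ++ ['*']
        else if b = 0 ∨ b = p then result ++ ['*']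
        else result ++ [' ']) acc = acc ++ pvRow n p := by
  have hfun : (fun (result : List Char) (b : Int) =>
      if p = 0 ∨ p = n - 1 then result ++ ['*']
      else if b = 0 ∨ b = p then result ++ ['*']
      else result ++ [' '])
    = fun result b => result ++ [if p = 0 ∨ p = n - 1 then '*'
      else if b = 0 ∨ b = p then '*' else ' '] := by
    funext result b; split_ifs <;> rfl
  rw [hfun, PySem.List.foldl_append_singleton_eq_map]
  congr 1
  rw [PySem.List.pyRange_one]
  by_cases hedge : p = 0 ∨ p = n - 1
  · simp only [pvRow, if_pos hedge]
    simp [List.map_map, Function.comp, List.eq_replicate_iff]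
  · simp only [pvRow, if_neg hedge]
    obtain ⟨k, rfl⟩ : ∃ k : Nat, p = (k : Int) := ⟨p.toNat, by omega⟩
    have hk1 : 1 ≤ k := by omega
    have h1 : ((k : Int) + 1 - 0).toNat = k + 1 := by omega
    rw [h1]
    have hsplit : List.range (k + 1) = List.range k ++ [k] := List.range_succ
    rw [hsplit, List.map_append, List.map_append]
    have hlast : (fun b : Nat => if (0 : Int) + (b : Int) = 0 ∨ (0 : Int) + (b : Int) = (k : Int) then '*' else ' ') k = '*' := by
      simp
    have hmid : (List.range k).map ((fun x : Int => if x = 0 ∨ x = (k : Int) then '*' else ' ') ∘ (fun b : Nat => (0 : Int) + (b : Int)))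
        = '*' :: List.replicate (k - 1) ' ' := by
      have := pv_mid_range (k - 1)
      have hk : k - 1 + 1 = k := by omega
      rw [hk] at this
      rw [← this]
      apply List.map_congr_left
      intro b hb
      have hbk : b < k := List.mem_range.mp hb
      simp only [Function.comp]
      by_cases hb0 : b = 0
      · simp [hb0]
      · have hne : ¬((0 : Int) + (b : Int) = 0 ∨ (0 : Int) + (b : Int) = (k : Int)) := by omega
        simp [hb0]
        omega
    simp only [List.map_map] at *
    rw [hmid]
    simp

-- ===== VERDICT (by name: the statement is the Claim_ definition above) =====
theorem hollow_right_triangle_spec : Claim_equal_hollow_right_triangle := by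
  intro n _
  unfold Spec_hollow_right_triangle hollow_right_triangle hollow_right_triangle_alt
  by_cases h4 : n < 4
  · simp [h4]
  · simp only [if_neg h4]
    congr 1
    have hsplit : PySem.List.pyRange 0 n 1
        = PySem.List.pyRange 0 (n - 1) 1 ++ [n - 1] := by
      have := PySem.List.pyRange_one_succ_right (a := 0) (b := n - 1) (by omega)
      simpa [show n - 1 + 1 = n by omega] using this
    -- prefix rows: every p there has 0 ≤ p < n - 1, so A appends row ++ '\n'
    have hbody : ∀ (acc : List Char), ∀ p ∈ PySem.List.pyRange 0 (n - 1) 1,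
        (fun (result : List Char) (p : Int) =>
          let result := (PySem.List.pyRange 0 (p + 1) 1).foldl (fun result b =>
            if p = 0 ∨ p = n - 1 then result ++ ['*']
            else if b = 0 ∨ b = p then result ++ ['*']
            else result ++ [' ']) result
          if p < n - 1 then result ++ ['\n'] else result) acc p
        = acc ++ (pvRow n p ++ ['\n']) := by
      intro acc p hp
      have hmem := (PySem.List.mem_pyRange_one (a := 0) (b := n - 1) (x := p)).mp hp
      simp only []
      rw [pv_inner n p hmem.1 (by omega) acc]
      rw [if_pos hmem.2]
      simp
    have hcong := PySem.List.foldl_congr_mem (PySem.List.pyRange 0 (n - 1) 1) _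
      (fun acc p => acc ++ (pvRow n p ++ ['\n'])) ([] : List Char) hbody
    rw [hsplit, List.foldl_append, hcong, PySem.List.foldl_append_eq_flatMap,
        List.foldl_cons, List.foldl_nil]
    rw [pv_inner n (n - 1) (by omega) (by omega)]
    rw [if_neg (by omega)]
    rw [List.map_append, List.map_cons, List.map_nil, pv_join_snoc]
    simp [List.flatMap_map]
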